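-- pv_equiv track=rewrite | github.com/pypi-data/pypi-mirror-312 | packages/f9ml/f9ml-0.1.6-py3-none-any.whl/f9ml/models/gnn/data_utils/graph_processors.py | _get_sorted_features_index
-- ===== SOURCE A (Python) =====
-- import copy
--
-- def _get_sorted_features_index(target_lst, reference_lst):
--     """Sort target_lst according to reference_lst.
--
--     Dummy example
--     -------------
--     target_lst = ["a", "b", "c"]
--     reference_lst = ["c", "a", "b"]
--     sorted_index = [1, 2, 0]
--
--     Jet3 node example for bbVV dataset
--     ----------------------------------
--     target_lst = ['Pt', 'Eta', 'Phi', 'JetM']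
--     reference_lst = ['E', 'Eta', 'JetM', 'LepM', 'LepM', 'LepQ', 'LepQ', 'Phi', 'Pt', 'Px', 'Py', 'Pz']
--     sorted_index = [8, 1, 7, 2]
--
--     Note for bbVV dataset
--     ---------------------
--     There are lots of zero columns in the node feature matrix. This is because the node feature matrix is created
--     with the assumption that all nodes have the same features and this is not the case for many nodes. For example,
--     the Jet3 node has only 4 (it does not have E, px, py, pz) features, while the Jet1 node has 8 features.
--
--     Parameters
--     ----------
--     target_lst : list
--         List of unsorted strings.
--     reference_lst : list
--         List of strings for target to be sorted against.
--
--     Returns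
--     -------
--     list
--         Sorted indices of target_lst.
--     """
--     sorted_index = []
--     checked_reference_lst = copy.deepcopy(reference_lst)
--
--     for target in target_lst:
--         ref_idx = checked_reference_lst.index(target)
--         sorted_index.append(ref_idx)
--         checked_reference_lst[ref_idx] = None
--
--     return sorted_index
-- ===== SOURCE B (Python) =====
-- def _get_sorted_features_index(target_lst, reference_lst):
--     """Sort target_lst according to reference_lst (one pass, no repeated scans).
--
--     Builds value -> list of positions in reference_lst once, then serves each
--     target the next unused position via a per-value cursor.
--     """
--     positions = {}
--     i = 0
--     for v in reference_lst:
--         positions.setdefault(v, []).append(i)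
--         i += 1
--     cursor = {}
--     sorted_index = []
--     for t in target_lst:
--         c = cursor.get(t, 0)
--         sorted_index.append(positions[t][c])
--         cursor[t] = c + 1
--     return sorted_index
-- ===== Notes on version B (the rewrite author's own statement) =====
-- stated objective: faster
-- what changed: Replaced A's per-target list.index scan over a mutated copy of reference_lst by a single pass that builds a value->positions dict and serves each target the next unused position via a per-value cursor.
import Mathlib
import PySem

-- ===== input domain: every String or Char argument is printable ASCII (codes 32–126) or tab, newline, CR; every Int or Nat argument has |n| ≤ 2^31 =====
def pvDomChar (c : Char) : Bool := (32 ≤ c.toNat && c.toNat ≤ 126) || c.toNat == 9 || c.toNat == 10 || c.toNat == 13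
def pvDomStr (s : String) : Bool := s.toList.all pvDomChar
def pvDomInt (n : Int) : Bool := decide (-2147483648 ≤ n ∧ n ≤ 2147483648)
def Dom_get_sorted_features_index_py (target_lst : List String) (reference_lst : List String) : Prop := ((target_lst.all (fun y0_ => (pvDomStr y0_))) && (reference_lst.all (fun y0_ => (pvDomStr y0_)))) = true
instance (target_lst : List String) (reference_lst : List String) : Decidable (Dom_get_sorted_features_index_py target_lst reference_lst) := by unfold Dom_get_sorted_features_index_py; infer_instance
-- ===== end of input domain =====

-- B replaces A's repeated list.index scans (O(n·m)) by a one-pass value→positions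
-- index with per-value cursors (O(n+m)); equal return values on Pre_.

-- ===== PORT A =====
-- checked_reference_lst holds Option String: None marks a consumed slot.
-- On a failed .index (Python ValueError, excluded by Pre_) the step is a no-op.
def get_sorted_features_index_py (target_lst : List String) (reference_lst : List String) : List Int :=
  (target_lst.foldl
    (fun (st : List (Option String) × List Int) target =>
      match PySem.List.index? st.1 (some target) with
      | some ref_idx => (st.1.set ref_idx none, st.2 ++ [(ref_idx : Int)])
      | none => st)
    (reference_lst.map some, [])).2

-- ===== PORT B =====
-- positions : value → list of its indices in reference_lst (enumerate = running counter);
-- cursor : value → how many of its positions are already used. Missing key / out-of-range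
-- (Python KeyError/IndexError, excluded by Pre_) defaults are only reached outside Pre_.
def get_sorted_features_index_py_alt (target_lst : List String) (reference_lst : List String) : List Int :=
  let positions : PySem.Dict String (List Int) :=
    (reference_lst.foldl
      (fun (st : Int × PySem.Dict String (List Int)) v =>
        (st.1 + 1, st.2.modify v [] (· ++ [st.1])))
      (0, PySem.Dict.empty)).2
  (target_lst.foldl
    (fun (st : PySem.Dict String Int × List Int) t =>
      let c := st.1.getD t 0
      (st.1.insert t (c + 1), st.2 ++ [PySem.List.pyGetD (positions.getD t []) c 0]))
    (PySem.Dict.empty, [])).2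

-- ===== PRECONDITION & SPEC =====
-- Pre_ excludes exactly the inputs where some target occurs more often in target_lst
-- than in reference_lst: there Python A raises ValueError (and B raises KeyError/IndexError).
def Pre_get_sorted_features_index_py (target_lst : List String) (reference_lst : List String) : Prop :=
  (target_lst.all (fun t => target_lst.count t ≤ reference_lst.count t)) = true
instance (target_lst : List String) (reference_lst : List String) : Decidable (Pre_get_sorted_features_index_py target_lst reference_lst) := by unfold Pre_get_sorted_features_index_py; infer_instance

def pvWitness_get_sorted_features_index_py : List String × List String :=
  (["Pt", "Eta", "Phi", "JetM"],
   ["E", "Eta", "JetM", "LepM", "LepM", "LepQ", "LepQ", "Phi", "Pt", "Px", "Py", "Pz"])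

def Spec_get_sorted_features_index_py (target_lst : List String) (reference_lst : List String) (out : List Int) : Prop := out = get_sorted_features_index_py_alt target_lst reference_lst
instance (target_lst : List String) (reference_lst : List String) (out : List Int) : Decidable (Spec_get_sorted_features_index_py target_lst reference_lst out) := by unfold Spec_get_sorted_features_index_py; infer_instance

-- ===== CLAIM (what is proved, stated in full; the proofs are below) =====
def Claim_equal_get_sorted_features_index_py : Prop := ∀ (target_lst : List String) (reference_lst : List String), Dom_get_sorted_features_index_py target_lst reference_lst → Pre_get_sorted_features_index_py target_lst reference_lst → Spec_get_sorted_features_index_py target_lst reference_lst (get_sorted_features_index_py target_lst reference_lst)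

-- ===== LEMMAS AND PROOFS =====

-- occN ref t : the (0-based) positions of t in ref, in order.
def occN : List String → String → List Nat
  | [], _ => []
  | v :: rest, t => (if v = t then [0] else []) ++ (occN rest t).map (· + 1)

-- mask ref c : ref with, for each value s, its first (c s) occurrences blanked to none.
def maskRef : List String → (String → Nat) → List (Option String)
  | [], _ => []
  | v :: rest, c =>
      (if c v = 0 then some v else none) ::
        maskRef rest (fun s => if s = v then c s - 1 else c s)

theorem occN_length (ref : List String) (t : String) : (occN ref t).length = ref.count t := by
  induction ref with
  | nil => simp [occN]
  | cons v rest ih =>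
    by_cases h : v = t <;> simp [occN, h, ih]

theorem maskRef_zero (ref : List String) : maskRef ref (fun _ => 0) = ref.map some := by
  induction ref with
  | nil => rfl
  | cons v rest ih =>
    simp only [maskRef, List.map]
    refine congrArg₂ _ (by simp) ?_
    convert ih using 2
    funext s; split_ifs <;> rfl

theorem getD_map_add_one (l : List Nat) (k : Nat) (hk : k < l.length) :
    (l.map (· + 1)).getD k 0 = l.getD k 0 + 1 := by
  rw [List.getD_eq_getElem _ _ (by simpa using hk), List.getD_eq_getElem _ _ hk]
  simp

theorem occ_cons_getD_pos (l : List Nat) (k : Nat) (h0 : k ≠ 0) (hk : k - 1 < l.length) :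
    (0 :: l.map (· + 1)).getD k 0 = l.getD (k - 1) 0 + 1 := by
  obtain ⟨j, rfl⟩ : ∃ j, k = j + 1 := ⟨k - 1, by omega⟩
  simp only [List.getD_cons_succ, Nat.add_sub_cancel]
  exact getD_map_add_one _ _ (by simpa using hk)

theorem index?_maskRef_eq (ref : List String) (t : String) (c : String → Nat)
    (h : c t < ref.count t) :
    PySem.List.index? (maskRef ref c) (some t) = some ((occN ref t).getD (c t) 0) := by
  induction ref generalizing c with
  | nil => simp [List.count_nil] at h
  | cons v rest ih =>
    by_cases hv : v = t
    · subst hv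
      by_cases h0 : c v = 0
      · rw [maskRef, if_pos h0, PySem.List.index?_cons_self]
        simp [occN, h0]
      · have hcount : c v - 1 < rest.count v := by
          have := h; rw [List.count_cons_self] at this; omega
        have hne : (none : Option String) ≠ some v := by simp
        rw [maskRef, if_neg h0, PySem.List.index?_cons_of_ne _ hne,
          ih _ (by simpa using hcount)]
        have hg := occ_cons_getD_pos (occN rest v) (c v) h0
          (by rw [occN_length]; exact hcount)
        rw [Option.map_some, occN,
          show (if v = v then [0] else ([] : List Nat)) = [0] from by simp,
          List.singleton_append, hg]
        simp
    · have hcount : c t < rest.count t := by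
        have := h
        rw [List.count_cons_of_ne (by simpa [eq_comm] using hv)] at this
        omega
      have hne : (if c v = 0 then some v else none) ≠ some t := by
        split_ifs <;> simp [hv]
      rw [maskRef, PySem.List.index?_cons_of_ne _ hne,
        ih _ (by simp only [if_neg (fun hh : t = v => hv hh.symm)]; exact hcount)]
      have hlen : c t < (occN rest t).length := by rw [occN_length]; exact hcount
      rw [Option.map_some, occN, if_neg hv, List.nil_append,
        getD_map_add_one _ _ hlen]
      rw [if_neg (by simpa [eq_comm] using hv)]

theorem set_maskRef_eq (ref : List String) (t : String) (c : String → Nat)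
    (h : c t < ref.count t) :
    (maskRef ref c).set ((occN ref t).getD (c t) 0) none
      = maskRef ref (fun s => if s = t then c s + 1 else c s) := by
  induction ref generalizing c with
  | nil => simp [List.count_nil] at h
  | cons v rest ih =>
    by_cases hv : v = t
    · subst hv
      by_cases h0 : c v = 0
      · rw [occN, show (if v = v then [0] else ([] : List Nat)) = [0] from by simp,
          List.singleton_append, h0, List.getD_cons_zero, maskRef, maskRef,
          List.set_cons_zero, if_neg (by simp : ¬(if v = v then c v + 1 else c v) = 0)]
        refine congrArg₂ _ rfl (congrArg _ (funext fun s => ?_))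
        by_cases hs : s = v <;> simp [hs, h0]
      · have hcount : c v - 1 < rest.count v := by
          have := h; rw [List.count_cons_self] at this; omega
        have hg := occ_cons_getD_pos (occN rest v) (c v) h0
          (by rw [occN_length]; exact hcount)
        rw [occN, show (if v = v then [0] else ([] : List Nat)) = [0] from by simp,
          List.singleton_append, hg, maskRef, maskRef, List.set_cons_succ]
        have hih := ih (fun s => if s = v then c s - 1 else c s)
          (by simpa using hcount)
        simp only [if_true] at hih
        refine congrArg₂ _ (by simp [h0]) ?_
        rw [hih]
        refine congrArg _ (funext fun s => ?_)
        by_cases hs : s = v <;> simp [hs] <;> omega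
    · have hcount : c t < rest.count t := by
        have := h
        rw [List.count_cons_of_ne (by simpa [eq_comm] using hv)] at this
        omega
      have hlen : c t < (occN rest t).length := by rw [occN_length]; exact hcount
      rw [occN, if_neg hv, List.nil_append, getD_map_add_one _ _ hlen,
        maskRef, maskRef, List.set_cons_succ]
      have hih := ih (fun s => if s = v then c s - 1 else c s)
        (by simp only [if_neg (fun hh : t = v => hv hh.symm)]; exact hcount)
      simp only [if_neg (fun hh : t = v => hv hh.symm)] at hih
      refine congrArg₂ _ (by simp [fun hh : v = t => hv hh]) ?_
      rw [hih]
      refine congrArg _ (funext fun s => ?_)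
      by_cases hs : s = v <;> by_cases hst : s = t <;> simp [hs, hst] <;> simp_all

theorem positions_getD_eq (ref : List String) (t : String) :
    ∀ (i : Int) (d : PySem.Dict String (List Int)),
    ((ref.foldl (fun (st : Int × PySem.Dict String (List Int)) v =>
        (st.1 + 1, st.2.modify v [] (· ++ [st.1]))) (i, d)).2).getD t []
      = d.getD t [] ++ (occN ref t).map (fun n => Int.ofNat n + i) := by
  induction ref with
  | nil => intro i d; simp [occN]
  | cons v rest ih =>
    intro i d
    rw [List.foldl_cons, ih (i + 1), PySem.Dict.getD_modify]
    by_cases hv : t = v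
    · subst hv
      rw [if_pos rfl, occN, show (if t = t then [0] else ([] : List Nat)) = [0] from by simp,
        List.singleton_append, List.map_cons, List.map_map]
      rw [List.map_congr_left (fun (n : Nat) _ =>
        (by simp [Function.comp]; ring :
          ((fun n => Int.ofNat n + i) ∘ fun x => x + 1) n = Int.ofNat n + (i + 1)))]
      simp [List.append_assoc]
    · rw [if_neg hv, occN, if_neg (fun hh : v = t => hv hh.symm), List.nil_append,
        List.map_map]
      rw [List.map_congr_left (fun (n : Nat) _ =>
        (by simp [Function.comp]; ring :
          ((fun n => Int.ofNat n + i) ∘ fun x => x + 1) n = Int.ofNat n + (i + 1)))]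

theorem getD_map_intCast (l : List Nat) (k : Nat) (hk : k < l.length) :
    (l.map (fun n => Int.ofNat n)).getD k 0 = Int.ofNat (l.getD k 0) := by
  rw [List.getD_eq_getElem _ _ (by simpa using hk), List.getD_eq_getElem _ _ hk]
  simp

theorem loop_eq (ref : List String) (P : PySem.Dict String (List Int))
    (hP : ∀ t, P.getD t [] = (occN ref t).map (fun n => Int.ofNat n)) :
    ∀ (targets : List String) (c : String → Nat) (checked : List (Option String))
      (cur : PySem.Dict String Int) (acc : List Int),
    (∀ s ∈ targets, c s + targets.count s ≤ ref.count s) →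
    checked = maskRef ref c →
    (∀ s, cur.getD s 0 = (c s : Int)) →
    (targets.foldl
      (fun (st : List (Option String) × List Int) target =>
        match PySem.List.index? st.1 (some target) with
        | some ref_idx => (st.1.set ref_idx none, st.2 ++ [(ref_idx : Int)])
        | none => st) (checked, acc)).2
    = (targets.foldl
      (fun (st : PySem.Dict String Int × List Int) t =>
        let c := st.1.getD t 0
        (st.1.insert t (c + 1), st.2 ++ [PySem.List.pyGetD (P.getD t []) c 0]))
      (cur, acc)).2 := by
  intro targets
  induction targets with
  | nil => intro c checked cur acc _ _ _; rfl
  | cons t ts ih =>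
    intro c checked cur acc hc hchk hcur
    subst hchk
    have hct : c t < ref.count t := by
      have h1 := hc t List.mem_cons_self
      rw [List.count_cons_self] at h1
      omega
    have hlen : c t < (occN ref t).length := by rw [occN_length]; exact hct
    rw [List.foldl_cons, List.foldl_cons]
    simp only [index?_maskRef_eq ref t c hct, hcur t, hP t]
    rw [set_maskRef_eq ref t c hct]
    have hval : PySem.List.pyGetD ((occN ref t).map (fun n => Int.ofNat n)) ((c t : Nat) : Int) 0
        = Int.ofNat ((occN ref t).getD (c t) 0) := by
      rw [PySem.List.pyGetD_natCast, getD_map_intCast _ _ hlen]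
    rw [hval]
    exact ih (fun s => if s = t then c s + 1 else c s) _ _ _
      (by
        intro s hs
        by_cases hst : s = t
        · subst hst
          have h2 := hc s List.mem_cons_self
          rw [List.count_cons_self] at h2
          simp
          omega
        · have h2 := hc s (List.mem_cons_of_mem t hs)
          rw [List.count_cons] at h2
          simp at h2
          simp [hst]
          omega)
      rfl
      (by
        intro s'
        rw [PySem.Dict.getD_insert]
        by_cases hst : s' = t
        · subst hst; simp
        · simp [hst]; exact hcur s')

-- ===== VERDICT (by name: the statement is the Claim_ definition above) =====
theorem get_sorted_features_index_py_spec : Claim_equal_get_sorted_features_index_py := by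
  intro target_lst reference_lst _ hpre
  unfold Spec_get_sorted_features_index_py
  unfold get_sorted_features_index_py get_sorted_features_index_py_alt
  refine loop_eq reference_lst _ (fun t => ?_) target_lst (fun _ => 0) _ _ []
    (fun s hs => ?_) (maskRef_zero reference_lst).symm (fun s => by simp)
  · rw [positions_getD_eq reference_lst t 0 PySem.Dict.empty]
    simp
  · have := (List.all_eq_true.mp hpre) s hs
    simpa using this
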